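-- pv_equiv track=rewrite | github.com/joncotton/django-ldap3-sync | ldap_sync/management/commands/syncldap.py | generate_value_map
-- ===== SOURCE A (Python) =====
-- def generate_value_map(attribute_map, ldap_attribute_values):
--     '''Given an attribute map (dict with keys as ldap attrs and values as model attrs) generate a dictionary
--        which maps model attribute keys to ldap values'''
--     value_map = {}
--     for ldap_attr, model_attr in attribute_map.items():
--         try:
--             value_map[model_attr] = ldap_attribute_values[ldap_attr]
--         except KeyError:
--             raise MissingLdapField(ldap_attr)
--     return value_map
--
-- class MissingLdapField(Exception):
--     pass
-- ===== SOURCE B (Python) =====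
-- class MissingLdapField(Exception):
--     pass
--
--
-- def generate_value_map(attribute_map, ldap_attribute_values):
--     missing = next((k for k in attribute_map if k not in ldap_attribute_values), None)
--     if missing is not None:
--         raise MissingLdapField(missing)
--     return {model_attr: ldap_attribute_values[ldap_attr]
--             for ldap_attr, model_attr in attribute_map.items()}
-- ===== Notes on version B (the rewrite author's own statement) =====
-- stated objective: idiomatic
-- what changed: Replaces the interleaved loop with try/except per lookup by a separate ordered validation pass (next over a generator finds the first missing ldap attr) followed by a single dict comprehension that builds the result.
import Mathlib
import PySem

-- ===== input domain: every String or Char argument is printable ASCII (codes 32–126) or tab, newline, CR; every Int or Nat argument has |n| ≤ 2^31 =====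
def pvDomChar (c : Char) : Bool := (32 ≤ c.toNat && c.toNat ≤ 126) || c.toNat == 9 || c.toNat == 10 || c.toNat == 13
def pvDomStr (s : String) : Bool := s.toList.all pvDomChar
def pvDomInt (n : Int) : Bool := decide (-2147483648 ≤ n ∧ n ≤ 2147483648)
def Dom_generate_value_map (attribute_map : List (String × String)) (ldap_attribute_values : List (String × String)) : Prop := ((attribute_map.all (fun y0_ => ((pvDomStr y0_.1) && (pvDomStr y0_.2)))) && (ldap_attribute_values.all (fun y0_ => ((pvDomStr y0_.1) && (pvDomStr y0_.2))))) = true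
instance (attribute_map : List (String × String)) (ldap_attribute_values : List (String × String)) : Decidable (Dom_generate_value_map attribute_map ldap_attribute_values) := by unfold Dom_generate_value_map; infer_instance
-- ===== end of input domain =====

-- One line: B validates first (first missing ldap attr, in iteration order) and then builds
-- the result with a dict comprehension, instead of A's interleaved loop with try/except; same cost,
-- more idiomatic. Equivalence is about the return value; both raise MissingLdapField on the
-- inputs Pre_ excludes.

-- ===== PORT A =====
-- loop 'for ldap_attr, model_attr in attribute_map.items(): value_map[model_attr] = ldap_attribute_values[ldap_attr]'
-- on a missing key Python raises MissingLdapField (excluded by Pre_); the port stops there (value unclaimed).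
def gvmLoopA (lavD : PySem.Dict String String) :
    List (String × String) → PySem.Dict String String → PySem.Dict String String
  | [], vm => vm
  | (ldap_attr, model_attr) :: rest, vm =>
    match lavD.get? ldap_attr with
    | some v => gvmLoopA lavD rest (vm.insert model_attr v)
    | none => vm  -- raise MissingLdapField(ldap_attr): unreachable under Pre_

def generate_value_map (attribute_map : List (String × String)) (ldap_attribute_values : List (String × String)) : List (String × String) :=
  (gvmLoopA (PySem.Dict.ofList ldap_attribute_values)
      (PySem.Dict.ofList attribute_map).items PySem.Dict.empty).items

-- ===== PORT B =====
def generate_value_map_alt (attribute_map : List (String × String)) (ldap_attribute_values : List (String × String)) : List (String × String) :=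
  -- missing = next((k for k in attribute_map if k not in ldap_attribute_values), None)
  match (PySem.Dict.ofList attribute_map).keys.find?
      (fun k => !((PySem.Dict.ofList ldap_attribute_values).contains k)) with
  | some _ => []  -- raise MissingLdapField(missing): unreachable under Pre_
  | none =>
    -- {model_attr: ldap_attribute_values[ldap_attr] for ldap_attr, model_attr in attribute_map.items()}
    ((PySem.Dict.ofList attribute_map).items.foldl
        (fun vm p => vm.insert p.2 ((PySem.Dict.ofList ldap_attribute_values).getD p.1 "")) PySem.Dict.empty).items

-- ===== PRECONDITION & SPEC =====
-- Pre_ excludes exactly the inputs on which A raises MissingLdapField: some ldap attr of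
-- attribute_map has no entry in ldap_attribute_values.
def Pre_generate_value_map (attribute_map : List (String × String)) (ldap_attribute_values : List (String × String)) : Prop :=
  attribute_map.all (fun p => (PySem.Dict.ofList ldap_attribute_values).contains p.1) = true
instance (attribute_map : List (String × String)) (ldap_attribute_values : List (String × String)) : Decidable (Pre_generate_value_map attribute_map ldap_attribute_values) := by unfold Pre_generate_value_map; infer_instance

def pvWitness_generate_value_map : (List (String × String)) × (List (String × String)) :=
  ([("uid", "username"), ("mail", "email")], [("uid", "jdoe"), ("mail", "j@x.org"), ("cn", "J Doe")])

def Spec_generate_value_map (attribute_map : List (String × String)) (ldap_attribute_values : List (String × String)) (out : List (String × String)) : Prop := out = generate_value_map_alt attribute_map ldap_attribute_values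
instance (attribute_map : List (String × String)) (ldap_attribute_values : List (String × String)) (out : List (String × String)) : Decidable (Spec_generate_value_map attribute_map ldap_attribute_values out) := by unfold Spec_generate_value_map; infer_instance

-- ===== CLAIM (what is proved, stated in full; the proofs are below) =====
def Claim_equal_generate_value_map : Prop := ∀ (attribute_map : List (String × String)) (ldap_attribute_values : List (String × String)), Dom_generate_value_map attribute_map ldap_attribute_values → Pre_generate_value_map attribute_map ldap_attribute_values → Spec_generate_value_map attribute_map ldap_attribute_values (generate_value_map attribute_map ldap_attribute_values)

-- ===== LEMMAS AND PROOFS =====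

-- every key of Dict.ofList l is a first component of l
lemma mem_keys_ofList {l : List (String × String)} {k : String}
    (h : k ∈ (PySem.Dict.ofList l).keys) : ∃ p ∈ l, p.1 = k := by
  have : (PySem.Dict.ofList l).keys = PySem.Set.update (PySem.Dict.empty (κ := String) (ν := String)).keys (l.map (·.1)) := by
    simpa using PySem.Dict.keys_foldl_insert_key (l := l) (key := (·.1))
      (f := fun d x => x.2) (d := PySem.Dict.empty)
  rw [this] at h
  have h2 : k ∈ l.map (·.1) := by
    simpa [PySem.Dict.keys_empty, PySem.Set.update_nil_left, PySem.Set.mem_ofList] using h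
  exact List.mem_map.mp h2

-- under "every key present", A's interleaved loop equals B's comprehension fold
lemma gvmLoopA_eq_foldl (lavD : PySem.Dict String String) :
    ∀ (l : List (String × String)) (vm : PySem.Dict String String),
      (∀ p ∈ l, lavD.contains p.1 = true) →
      gvmLoopA lavD l vm = l.foldl (fun vm p => vm.insert p.2 (lavD.getD p.1 "")) vm := by
  intro l
  induction l with
  | nil => intro vm _; rfl
  | cons p rest ih =>
    intro vm h
    obtain ⟨k, m⟩ := p
    have hc : lavD.contains k = true := h (k, m) (List.mem_cons_self ..)
    rw [PySem.Dict.contains_eq_isSome_get?] at hc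
    obtain ⟨v, hv⟩ := Option.isSome_iff_exists.mp hc
    have hd : lavD.getD k "" = v := by rw [PySem.Dict.getD_eq_get?_getD, hv]; rfl
    simp only [gvmLoopA, hv, List.foldl_cons, hd]
    exact ih _ (fun q hq => h q (List.mem_cons_of_mem _ hq))

-- ===== VERDICT (by name: the statement is the Claim_ definition above) =====
theorem generate_value_map_spec : Claim_equal_generate_value_map := by
  intro am lav _ hpre
  unfold Spec_generate_value_map generate_value_map generate_value_map_alt
  unfold Pre_generate_value_map at hpre
  rw [List.all_eq_true] at hpre
  have hkeys : ∀ k ∈ (PySem.Dict.ofList am).keys,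
      (PySem.Dict.ofList lav).contains k = true := by
    intro k hk
    obtain ⟨p, hp, hpk⟩ := mem_keys_ofList hk
    simpa [hpk] using hpre p hp
  have hfind : (PySem.Dict.ofList am).keys.find?
      (fun k => !(PySem.Dict.ofList lav).contains k) = none := by
    rw [List.find?_eq_none]
    intro k hk
    simp [hkeys k hk]
  simp only [hfind]
  rw [gvmLoopA_eq_foldl]
  intro p hp
  exact hkeys p.1 (PySem.Dict.mem_keys_of_mem_items _ hp)
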